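-- pv_equiv track=rewrite | github.com/AytugUlubay/codeWarsPython | kyu7/Sum the Repeats.py | repeat_sum
-- ===== SOURCE A (Python) =====
-- def repeat_sum(l):
--     k = []
--     for i in range(len(l)):
--         for j in l[i]:
--             m = i + 1
--             while m < len(l):
--                 if j in l[m]:
--                     k.append(j)
--                     break
--                 m += 1
--     s=set(k)
--     x=list(s)
--     return(sum(x))
-- ===== SOURCE B (Python) =====
-- def repeat_sum(l):
--     seen = set()
--     repeated = set()
--     for sub in l:
--         s = set(sub)
--         repeated |= seen & s
--         seen |= s
--     return sum(repeated)
-- ===== Notes on version B (the rewrite author's own statement) =====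
-- stated objective: faster
-- what changed: Replaced A's nested forward scan (for each element, search all later sublists for a repeat) by a single pass maintaining 'seen' and 'repeated' sets, summing 'repeated' at the end.
import Mathlib
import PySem

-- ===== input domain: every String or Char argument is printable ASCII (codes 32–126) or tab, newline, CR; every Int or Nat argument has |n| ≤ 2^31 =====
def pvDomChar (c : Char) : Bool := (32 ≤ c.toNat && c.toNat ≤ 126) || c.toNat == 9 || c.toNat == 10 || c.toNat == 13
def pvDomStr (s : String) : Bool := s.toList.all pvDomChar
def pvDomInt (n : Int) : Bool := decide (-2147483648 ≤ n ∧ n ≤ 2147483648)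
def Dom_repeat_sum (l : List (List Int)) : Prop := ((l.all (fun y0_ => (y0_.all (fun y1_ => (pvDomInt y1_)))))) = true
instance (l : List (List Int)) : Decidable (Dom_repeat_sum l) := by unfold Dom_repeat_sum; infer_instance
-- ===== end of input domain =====

-- B replaces A's nested forward scans (for each element, search all later sublists)
-- by one pass maintaining 'seen'/'repeated' sets; return value only, no mutation.

-- ===== PORT A =====
-- the 'while m < len(l): if j in l[m]: k.append(j); break; m += 1' loop
def repeatSumWhile (l : List (List Int)) (j : Int) (k : List Int) (m : Nat) : List Int :=
  if h : m < l.length then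
    if j ∈ l.getD m [] then k ++ [j]
    else repeatSumWhile l j k (m + 1)
  else k
termination_by l.length - m

def repeat_sum (l : List (List Int)) : Int :=
  let k := (List.range l.length).foldl
    (fun k i => (l.getD i []).foldl (fun k j => repeatSumWhile l j k (i + 1)) k) []
  (PySem.Set.ofList k).sum

-- ===== PORT B =====
def repeat_sum_alt (l : List (List Int)) : Int :=
  let p := l.foldl
    (fun (p : PySem.Set Int × PySem.Set Int) sub =>
      let s : PySem.Set Int := PySem.Set.ofList sub
      (PySem.Set.union p.1 s, PySem.Set.union p.2 (PySem.Set.inter p.1 s)))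
    (PySem.Set.empty, PySem.Set.empty)
  p.2.sum

-- ===== PRECONDITION & SPEC =====
def Spec_repeat_sum (l : List (List Int)) (out : Int) : Prop := out = repeat_sum_alt l
instance (l : List (List Int)) (out : Int) : Decidable (Spec_repeat_sum l out) := by unfold Spec_repeat_sum; infer_instance

-- ===== CLAIM (what is proved, stated in full; the proofs are below) =====
def Claim_equal_repeat_sum : Prop := ∀ (l : List (List Int)), Dom_repeat_sum l → Spec_repeat_sum l (repeat_sum l)

-- ===== LEMMAS AND PROOFS =====

-- x appears in two distinct sublists of l
def RepIn (l : List (List Int)) (x : Int) : Prop :=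
  ∃ i m : Nat, i < m ∧ m < l.length ∧ x ∈ l.getD i [] ∧ x ∈ l.getD m []

theorem mem_repeatSumWhile (l : List (List Int)) (j : Int) (k : List Int) (m : Nat) (x : Int) :
    x ∈ repeatSumWhile l j k m ↔
      x ∈ k ∨ (x = j ∧ ∃ m', m ≤ m' ∧ m' < l.length ∧ j ∈ l.getD m' []) := by
  fun_induction repeatSumWhile l j k m with
  | case1 m h hmem =>
      simp only [List.mem_append, List.mem_singleton]
      constructor
      · rintro (hk | rfl)
        · exact Or.inl hk
        · exact Or.inr ⟨rfl, m, le_refl m, h, hmem⟩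
      · rintro (hk | ⟨rfl, _⟩)
        · exact Or.inl hk
        · exact Or.inr rfl
  | case2 m h hmem ih =>
      rw [ih]
      constructor
      · rintro (hk | ⟨rfl, m', h1, h2, h3⟩)
        · exact Or.inl hk
        · exact Or.inr ⟨rfl, m', by omega, h2, h3⟩
      · rintro (hk | ⟨rfl, m', h1, h2, h3⟩)
        · exact Or.inl hk
        · refine Or.inr ⟨rfl, m', ?_, h2, h3⟩
          rcases Nat.eq_or_lt_of_le h1 with rfl | hlt
          · exact absurd h3 hmem
          · omega
  | case3 m h =>
      constructor
      · exact Or.inl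
      · rintro (hk | ⟨_, m', h1, h2, _⟩)
        · exact hk
        · omega

theorem mem_innerFold (l : List (List Int)) (sub : List Int) (i : Nat) (k : List Int) (x : Int) :
    x ∈ sub.foldl (fun k j => repeatSumWhile l j k (i + 1)) k ↔
      x ∈ k ∨ (x ∈ sub ∧ ∃ m', i < m' ∧ m' < l.length ∧ x ∈ l.getD m' []) := by
  induction sub generalizing k with
  | nil => simp
  | cons j rest ih =>
      simp only [List.foldl_cons, ih, mem_repeatSumWhile, List.mem_cons]
      constructor
      · rintro ((hk | ⟨rfl, m', h1, h2, h3⟩) | ⟨hr, hm⟩)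
        · exact Or.inl hk
        · exact Or.inr ⟨Or.inl rfl, m', by omega, h2, h3⟩
        · exact Or.inr ⟨Or.inr hr, hm⟩
      · rintro (hk | ⟨(rfl | hr), m', h1, h2, h3⟩)
        · exact Or.inl (Or.inl hk)
        · exact Or.inl (Or.inr ⟨rfl, m', by omega, h2, h3⟩)
        · exact Or.inr ⟨hr, m', h1, h2, h3⟩

theorem mem_outerFold (l : List (List Int)) (n : Nat) (k : List Int) (x : Int) :
    x ∈ (List.range n).foldl
        (fun k i => (l.getD i []).foldl (fun k j => repeatSumWhile l j k (i + 1)) k) k ↔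
      x ∈ k ∨ ∃ i m : Nat, i < n ∧ i < m ∧ m < l.length ∧ x ∈ l.getD i [] ∧ x ∈ l.getD m [] := by
  induction n generalizing k with
  | zero => simp
  | succ n ih =>
      rw [List.range_succ, List.foldl_append]
      simp only [List.foldl_cons, List.foldl_nil, ih, mem_innerFold]
      constructor
      · rintro ((hk | ⟨i, m, hi, him, hm, hxi, hxm⟩) | ⟨hs, m', h1, h2, h3⟩)
        · exact Or.inl hk
        · exact Or.inr ⟨i, m, by omega, him, hm, hxi, hxm⟩
        · exact Or.inr ⟨n, m', by omega, h1, h2, hs, h3⟩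
      · rintro (hk | ⟨i, m, hi, him, hm, hxi, hxm⟩)
        · exact Or.inl (Or.inl hk)
        · by_cases hin : i < n
          · exact Or.inl (Or.inr ⟨i, m, hin, him, hm, hxi, hxm⟩)
          · have : i = n := by omega
            subst this
            exact Or.inr ⟨hxi, m, him, hm, hxm⟩

theorem mem_A_k (l : List (List Int)) (x : Int) :
    x ∈ (List.range l.length).foldl
        (fun k i => (l.getD i []).foldl (fun k j => repeatSumWhile l j k (i + 1)) k) [] ↔
      RepIn l x := by
  rw [mem_outerFold]
  unfold RepIn
  constructor
  · rintro (h | ⟨i, m, _, him, hm, hxi, hxm⟩)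
    · simp at h
    · exact ⟨i, m, him, hm, hxi, hxm⟩
  · rintro ⟨i, m, him, hm, hxi, hxm⟩
    exact Or.inr ⟨i, m, by omega, him, hm, hxi, hxm⟩

-- helper: membership in some sublist ↔ an index witnesses it
theorem exists_mem_iff_getD (t : List (List Int)) (x : Int) :
    (∃ s ∈ t, x ∈ s) ↔ ∃ i, i < t.length ∧ x ∈ t.getD i [] := by
  constructor
  · rintro ⟨s, hs, hx⟩
    obtain ⟨i, hi, rfl⟩ := List.mem_iff_getElem.mp hs
    exact ⟨i, hi, by rwa [List.getD_eq_getElem t [] hi]⟩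
  · rintro ⟨i, hi, hx⟩
    exact ⟨t[i], List.getElem_mem hi, by rwa [List.getD_eq_getElem t [] hi] at hx⟩

theorem getD_append_lt (t : List (List Int)) (sub : List Int) (i : Nat) (h : i < t.length) :
    (t ++ [sub]).getD i [] = t.getD i [] := by
  rw [List.getD_eq_getElem _ [] (by simp; omega), List.getD_eq_getElem t [] h,
    List.getElem_append_left h]

theorem getD_append_self (t : List (List Int)) (sub : List Int) :
    (t ++ [sub]).getD t.length [] = sub := by
  rw [List.getD_eq_getElem _ [] (by simp)]
  simp

theorem repIn_append (t : List (List Int)) (sub : List Int) (x : Int) :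
    RepIn (t ++ [sub]) x ↔ RepIn t x ∨ ((∃ s ∈ t, x ∈ s) ∧ x ∈ sub) := by
  unfold RepIn
  rw [exists_mem_iff_getD]
  constructor
  · rintro ⟨i, m, him, hm, hxi, hxm⟩
    simp only [List.length_append, List.length_singleton] at hm
    have hi : i < t.length := by omega
    rw [getD_append_lt t sub i hi] at hxi
    by_cases hmt : m < t.length
    · rw [getD_append_lt t sub m hmt] at hxm
      exact Or.inl ⟨i, m, him, hmt, hxi, hxm⟩
    · have : m = t.length := by omega
      subst this
      rw [getD_append_self] at hxm
      exact Or.inr ⟨⟨i, hi, hxi⟩, hxm⟩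
  · rintro (⟨i, m, him, hm, hxi, hxm⟩ | ⟨⟨i, hi, hxi⟩, hxs⟩)
    · exact ⟨i, m, him, by simp; omega,
        by rwa [getD_append_lt t sub i (by omega)],
        by rwa [getD_append_lt t sub m hm]⟩
    · exact ⟨i, t.length, hi, by simp,
        by rwa [getD_append_lt t sub i hi],
        by rw [getD_append_self]; exact hxs⟩

-- the loop of B and its invariant
def bStep (p : PySem.Set Int × PySem.Set Int) (sub : List Int) :
    PySem.Set Int × PySem.Set Int :=
  let s : PySem.Set Int := PySem.Set.ofList sub
  (PySem.Set.union p.1 s, PySem.Set.union p.2 (PySem.Set.inter p.1 s))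

theorem bFold_invariant (t : List (List Int)) :
    (t.foldl bStep (PySem.Set.empty, PySem.Set.empty)).1.Nodup ∧
    (t.foldl bStep (PySem.Set.empty, PySem.Set.empty)).2.Nodup ∧
    (∀ x, x ∈ (t.foldl bStep (PySem.Set.empty, PySem.Set.empty)).1 ↔ ∃ s ∈ t, x ∈ s) ∧
    (∀ x, x ∈ (t.foldl bStep (PySem.Set.empty, PySem.Set.empty)).2 ↔ RepIn t x) := by
  induction t using List.reverseRecOn with
  | nil =>
      refine ⟨List.nodup_nil, List.nodup_nil, ?_, ?_⟩
      · intro x; simp [PySem.Set.empty]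
      · intro x
        constructor
        · intro hx; simp [PySem.Set.empty] at hx
        · rintro ⟨i, m, _, hm, _⟩; simp at hm
  | append_singleton t sub ih =>
      obtain ⟨h1, h2, h3, h4⟩ := ih
      rw [List.foldl_append, List.foldl_cons, List.foldl_nil]
      refine ⟨PySem.Set.nodup_union _ _ h1, PySem.Set.nodup_union _ _ h2, ?_, ?_⟩
      · intro x
        rw [show (bStep (t.foldl bStep (PySem.Set.empty, PySem.Set.empty)) sub).1 =
          PySem.Set.union (t.foldl bStep (PySem.Set.empty, PySem.Set.empty)).1
            (PySem.Set.ofList sub) from rfl]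
        rw [PySem.Set.mem_union, h3, PySem.Set.mem_ofList]
        constructor
        · rintro (⟨s, hs, hx⟩ | hx)
          · exact ⟨s, by simp [hs], hx⟩
          · exact ⟨sub, by simp, hx⟩
        · rintro ⟨s, hs, hx⟩
          rcases List.mem_append.mp hs with hs | hs
          · exact Or.inl ⟨s, hs, hx⟩
          · simp only [List.mem_singleton] at hs; subst hs; exact Or.inr hx
      · intro x
        rw [show (bStep (t.foldl bStep (PySem.Set.empty, PySem.Set.empty)) sub).2 =
          PySem.Set.union (t.foldl bStep (PySem.Set.empty, PySem.Set.empty)).2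
            (PySem.Set.inter (t.foldl bStep (PySem.Set.empty, PySem.Set.empty)).1
              (PySem.Set.ofList sub)) from rfl]
        rw [PySem.Set.mem_union, PySem.Set.mem_inter, h4, h3, PySem.Set.mem_ofList,
          repIn_append]

-- ===== VERDICT (by name: the statement is the Claim_ definition above) =====
theorem repeat_sum_spec : Claim_equal_repeat_sum := by
  intro l _
  unfold Spec_repeat_sum repeat_sum repeat_sum_alt
  obtain ⟨_, hnodB, _, hmemB⟩ := bFold_invariant l
  have hperm : (PySem.Set.ofList ((List.range l.length).foldl
      (fun k i => (l.getD i []).foldl (fun k j => repeatSumWhile l j k (i + 1)) k) [])).Perm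
      ((l.foldl bStep (PySem.Set.empty, PySem.Set.empty)).2) := by
    rw [List.perm_ext_iff_of_nodup (PySem.Set.nodup_ofList _) hnodB]
    intro x
    rw [PySem.Set.mem_ofList, mem_A_k, hmemB]
  exact hperm.sum_eq
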